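-- pv_equiv track=rewrite | github.com/Raschert0/tennis_bot | bot/states/challenge.py | get_possible_levels
-- ===== SOURCE A (Python) =====
-- def get_possible_levels(l):
--     ret = []
--     for _ in range(3):
--         l -= 1
--         if l >= 1:
--             ret.append(l)
--         else:
--             break
--     return ret
-- ===== SOURCE B (Python) =====
-- def _below(x, k):
--     # levels strictly below x, down to at most k steps, stopping at level 1
--     if k == 0 or x <= 1:
--         return []
--     return [x - 1] + _below(x - 1, k - 1)
--
-- def get_possible_levels(l):
--     return _below(l, 3)
-- ===== Notes on version B (the rewrite author's own statement) =====
-- stated objective: simpler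
-- what changed: Replaces the bounded decrement/append/break loop over a mutable accumulator by a structural recursion on the remaining step count that builds the list front-to-back.
import Mathlib
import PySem

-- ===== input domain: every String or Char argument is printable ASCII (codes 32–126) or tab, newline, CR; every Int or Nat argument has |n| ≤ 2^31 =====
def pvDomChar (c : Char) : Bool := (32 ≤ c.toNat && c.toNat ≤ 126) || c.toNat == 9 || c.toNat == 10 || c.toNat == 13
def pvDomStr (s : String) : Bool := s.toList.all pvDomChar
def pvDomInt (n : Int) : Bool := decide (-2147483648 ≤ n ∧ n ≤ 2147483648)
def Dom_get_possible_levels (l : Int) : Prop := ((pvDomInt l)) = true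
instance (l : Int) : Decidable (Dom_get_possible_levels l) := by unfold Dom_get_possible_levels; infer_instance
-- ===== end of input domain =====

-- B replaces A's decrement/append/break loop over a mutable accumulator by a bounded
-- structural recursion building the list front-to-back (objective: simpler).

-- ===== PORT A =====
-- A's loop: for _ in range(3): l -= 1; if l >= 1: ret.append(l) else: break
def pvA_loop : Nat → Int → List Int → List Int
  | 0, _, ret => ret
  | n + 1, l, ret =>
    let l' := l - 1
    if l' ≥ 1 then pvA_loop n l' (ret ++ [l']) else ret

def get_possible_levels (l : Int) : List Int := pvA_loop 3 l []

-- ===== PORT B =====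
-- B's helper _below(x, k): [] if k == 0 or x <= 1, else (x-1) :: _below(x-1, k-1)
def pvB_below (x : Int) : Nat → List Int
  | 0 => []
  | k + 1 => if x ≤ 1 then [] else (x - 1) :: pvB_below (x - 1) k

def get_possible_levels_alt (l : Int) : List Int := pvB_below l 3

-- ===== PRECONDITION & SPEC =====
def Spec_get_possible_levels (l : Int) (out : List Int) : Prop := out = get_possible_levels_alt l
instance (l : Int) (out : List Int) : Decidable (Spec_get_possible_levels l out) := by unfold Spec_get_possible_levels; infer_instance

-- ===== CLAIM (what is proved, stated in full; the proofs are below) =====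
def Claim_equal_get_possible_levels : Prop := ∀ (l : Int), Dom_get_possible_levels l → Spec_get_possible_levels l (get_possible_levels l)

-- ===== LEMMAS AND PROOFS =====

-- ===== VERDICT (by name: the statement is the Claim_ definition above) =====
theorem get_possible_levels_spec : Claim_equal_get_possible_levels := by
  intro l _
  unfold Spec_get_possible_levels get_possible_levels get_possible_levels_alt
  rcases le_or_gt l 1 with h | h
  · simp only [pvA_loop, pvB_below, if_neg (by omega : ¬ (l - 1 ≥ 1)), if_pos h]
  · rcases le_or_gt l 2 with h2 | h2
    · have : l = 2 := by omega
      subst this; decide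
    · rcases le_or_gt l 3 with h3 | h3
      · have : l = 3 := by omega
        subst this; decide
      · simp only [pvA_loop, pvB_below,
          if_pos (by omega : l - 1 ≥ 1), if_pos (by omega : l - 1 - 1 ≥ 1),
          if_pos (by omega : l - 1 - 1 - 1 ≥ 1),
          if_neg (by omega : ¬ l ≤ 1), if_neg (by omega : ¬ l - 1 ≤ 1),
          if_neg (by omega : ¬ l - 1 - 1 ≤ 1)]
        simp
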